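-- pv_equiv track=rewrite | github.com/XavierFMW/AdventOfCode | 2022/Day6/main.py | find_marker_position
-- ===== SOURCE A (Python) =====
-- from collections import deque
--
-- def find_marker_position(text, size):
--     previous = deque(c for c in text[:size])
--     indexed = size
--
--     for char in text[size:]:
--         if not are_duplicates(previous):
--             return indexed
--         previous.popleft()
--         previous.append(char)
--         indexed += 1
--
-- def are_duplicates(collection):
--     seen = set(collection)
--     return len(collection) != len(seen)
-- ===== SOURCE B (Python) =====
-- def find_marker_position(text, size):
--     n = len(text)
--     window = text[:size]
--     length = len(window)
--     counts = {}
--     dups = 0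
--     for c in window:
--         counts[c] = counts.get(c, 0) + 1
--         if counts[c] == 2:
--             dups += 1
--     for k in range(n - length):
--         if dups == 0:
--             return size + k
--         c = text[k]
--         counts[c] = counts[c] - 1
--         if counts[c] == 1:
--             dups -= 1
--         c = text[k + length]
--         counts[c] = counts.get(c, 0) + 1
--         if counts[c] == 2:
--             dups += 1
--     return None
-- ===== Notes on version B (the rewrite author's own statement) =====
-- stated objective: faster
-- what changed: A rebuilds a set of the whole window and compares sizes at every position (O(size) per step); B slides the window once over the text, maintaining a character-count dict and a counter of duplicated characters, so each step is O(1).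
import Mathlib
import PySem

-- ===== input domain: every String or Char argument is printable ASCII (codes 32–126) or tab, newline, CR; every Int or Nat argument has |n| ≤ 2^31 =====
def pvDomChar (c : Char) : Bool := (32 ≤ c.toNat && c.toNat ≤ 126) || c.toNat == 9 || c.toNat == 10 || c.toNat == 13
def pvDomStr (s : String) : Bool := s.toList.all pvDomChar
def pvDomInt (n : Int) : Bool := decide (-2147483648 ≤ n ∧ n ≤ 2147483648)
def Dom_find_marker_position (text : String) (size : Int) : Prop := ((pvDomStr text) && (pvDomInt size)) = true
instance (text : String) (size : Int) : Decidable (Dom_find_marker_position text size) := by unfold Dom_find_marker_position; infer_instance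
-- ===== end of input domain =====

-- B replaces A's per-step set-based duplicate scan of the whole window by an incremental
-- count dictionary with a duplicate counter (one pass, O(1) work per step); same return value.

-- ===== PORT A =====
def are_duplicates (collection : List Char) : Bool :=
  let seen : PySem.Set Char := PySem.Set.ofList collection
  collection.length != seen.length

-- the 'for char in text[size:]' loop with its early return; deque.popleft() is .tail here:
-- it only runs when are_duplicates is true, which forces the deque to be non-empty
def fmpLoopA : List Char → List Char → Int → Option Int
  | [], _, _ => none
  | c :: rest, previous, indexed =>
    if !(are_duplicates previous) then some indexed
    else fmpLoopA rest (previous.tail ++ [c]) (indexed + 1)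

def find_marker_position (text : String) (size : Int) : Option Int :=
  let previous := (PySem.Str.slice text none (some size)).toList
  fmpLoopA (PySem.Str.slice text (some size) none).toList previous size

-- ===== PORT B =====
-- one step of B's first loop: counts[c] = counts.get(c, 0) + 1; if counts[c] == 2: dups += 1
def fmpInitStep (st : PySem.Dict Char Int × Int) (c : Char) : PySem.Dict Char Int × Int :=
  let v := st.1.getD c 0 + 1
  (st.1.insert c v, if v == 2 then st.2 + 1 else st.2)

-- B's second loop 'for k in range(n - length)'; m counts the remaining iterations;
-- text[k] / text[k + length] are s.getD _ ' ' (both indices are always in range here)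
def fmpLoopB (s : List Char) (length : Nat) (size : Int) :
    Nat → Nat → PySem.Dict Char Int → Int → Option Int
  | 0, _, _, _ => none
  | m + 1, k, counts, dups =>
    if dups == 0 then some (size + (k : Int))
    else
      let c1 := s.getD k ' '
      let v1 := counts.getD c1 0 - 1
      let counts1 := counts.insert c1 v1
      let dups1 := if v1 == 1 then dups - 1 else dups
      let c2 := s.getD (k + length) ' '
      let v2 := counts1.getD c2 0 + 1
      let counts2 := counts1.insert c2 v2
      let dups2 := if v2 == 2 then dups1 + 1 else dups1
      fmpLoopB s length size m (k + 1) counts2 dups2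

def find_marker_position_alt (text : String) (size : Int) : Option Int :=
  let s := text.toList
  let n := s.length
  let window := (PySem.Str.slice text none (some size)).toList
  let length := window.length
  let init := window.foldl fmpInitStep (PySem.Dict.empty, 0)
  fmpLoopB s length size (n - length) 0 init.1 init.2

-- ===== PRECONDITION & SPEC =====
def Spec_find_marker_position (text : String) (size : Int) (out : Option Int) : Prop := out = find_marker_position_alt text size
instance (text : String) (size : Int) (out : Option Int) : Decidable (Spec_find_marker_position text size out) := by unfold Spec_find_marker_position; infer_instance

-- ===== CLAIM (what is proved, stated in full; the proofs are below) =====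
def Claim_equal_find_marker_position : Prop := ∀ (text : String) (size : Int), Dom_find_marker_position text size → Spec_find_marker_position text size (find_marker_position text size)

-- ===== LEMMAS AND PROOFS =====

-- number of distinct characters occurring at least twice in w (the value B's dups tracks)
def dupCount (w : List Char) : Int :=
  ∑ c ∈ w.toFinset, (if 2 ≤ w.count c then (1 : Int) else 0)

theorem dupCount_eq_zero_iff (w : List Char) : dupCount w = 0 ↔ w.Nodup := by
  unfold dupCount
  rw [Finset.sum_eq_zero_iff_of_nonneg (by intro c _; split_ifs <;> norm_num)]
  constructor
  · intro h
    rw [List.nodup_iff_count_le_one]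
    intro a
    by_cases ha : a ∈ w
    · have := h a (List.mem_toFinset.mpr ha)
      by_contra hc
      rw [if_pos (by omega)] at this
      norm_num at this
    · rw [List.count_eq_zero_of_not_mem ha]; omega
  · intro h c _
    have := (List.nodup_iff_count_le_one.mp h) c
    rw [if_neg (by omega)]

theorem are_duplicates_false_iff (w : List Char) : are_duplicates w = false ↔ w.Nodup := by
  unfold are_duplicates
  have h1 : (PySem.Set.ofList w).length = w.dedup.length := by
    have hnd : (PySem.Set.ofList w).Nodup := PySem.Set.nodup_ofList w
    have hsub : (PySem.Set.ofList w).toFinset = w.toFinset := by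
      ext c; simp [List.mem_toFinset, PySem.Set.mem_ofList]
    rw [← List.toFinset_card_of_nodup hnd, hsub, List.card_toFinset]
  simp only [h1, bne_eq_false_iff_eq]
  constructor
  · intro h
    have := (List.dedup_sublist w).eq_of_length h.symm
    rw [← this]; exact List.nodup_dedup w
  · intro h; rw [List.dedup_eq_self.mpr h]

theorem dupCount_step (w w' : List Char) (x : Char)
    (hc : ∀ c, w'.count c = w.count c + (if c = x then 1 else 0)) :
    dupCount w' = dupCount w + (if w.count x = 1 then 1 else 0) := by
  have hmem : ∀ c, c ∈ w' ↔ c = x ∨ c ∈ w := by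
    intro c
    rw [← List.count_pos_iff, ← List.count_pos_iff (l := w), hc c]
    by_cases hcx : c = x <;> simp [hcx]
  have hF : w'.toFinset = insert x w.toFinset := by
    ext c; simp [List.mem_toFinset, hmem c]
  unfold dupCount
  rw [hF]
  by_cases hx : x ∈ w.toFinset
  · have hxw : x ∈ w := List.mem_toFinset.mp hx
    have h1 : 1 ≤ w.count x := List.count_pos_iff.mpr hxw
    rw [Finset.insert_eq_self.mpr hx]
    rw [← Finset.add_sum_erase _ (fun c => if 2 ≤ w'.count c then (1 : Int) else 0) hx,
        ← Finset.add_sum_erase _ (fun c => if 2 ≤ w.count c then (1 : Int) else 0) hx]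
    have hcongr : ∑ c ∈ w.toFinset.erase x, (if 2 ≤ w'.count c then (1 : Int) else 0)
        = ∑ c ∈ w.toFinset.erase x, (if 2 ≤ w.count c then (1 : Int) else 0) := by
      apply Finset.sum_congr rfl
      intro c hcm
      rw [hc c, if_neg (Finset.mem_erase.mp hcm).1, Nat.add_zero]
    rw [hcongr, hc x, if_pos rfl]
    rcases Nat.lt_or_ge (w.count x) 2 with h2 | h2
    · have hcx1 : w.count x = 1 := by omega
      norm_num [hcx1]
      ring
    · rw [if_pos (by omega), if_pos h2, if_neg (by omega)]
      ring
  · have hxw : x ∉ w := fun h => hx (List.mem_toFinset.mpr h)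
    have h0 : w.count x = 0 := List.count_eq_zero_of_not_mem hxw
    rw [Finset.sum_insert hx]
    have hcongr : ∑ c ∈ w.toFinset, (if 2 ≤ w'.count c then (1 : Int) else 0)
        = ∑ c ∈ w.toFinset, (if 2 ≤ w.count c then (1 : Int) else 0) := by
      apply Finset.sum_congr rfl
      intro c hcm
      have hne : c ≠ x := by rintro rfl; exact hxw (List.mem_toFinset.mp hcm)
      rw [hc c, if_neg hne, Nat.add_zero]
    rw [hcongr, hc x, if_pos rfl, h0]
    norm_num

theorem dupCount_append (w : List Char) (d : Char) :
    dupCount (w ++ [d]) = dupCount w + (if w.count d = 1 then 1 else 0) := by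
  apply dupCount_step
  intro c
  simp only [List.count_append, List.count_cons, List.count_nil, beq_iff_eq, Nat.zero_add]
  by_cases h : c = d
  · simp [h]
  · simp [h, Ne.symm h]

theorem dupCount_cons (c : Char) (w : List Char) :
    dupCount (c :: w) = dupCount w + (if w.count c = 1 then 1 else 0) := by
  apply dupCount_step
  intro c'
  simp only [List.count_cons, beq_iff_eq]
  by_cases h : c' = c
  · simp [h]
  · simp [h, Ne.symm h]

theorem init_inv (w : List Char) : ∀ (w0 : List Char) (counts : PySem.Dict Char Int) (dups : Int),
    (∀ c, counts.getD c 0 = (w0.count c : Int)) → dups = dupCount w0 →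
    (∀ c, (w.foldl fmpInitStep (counts, dups)).1.getD c 0 = ((w0 ++ w).count c : Int)) ∧
      (w.foldl fmpInitStep (counts, dups)).2 = dupCount (w0 ++ w) := by
  induction w with
  | nil =>
    intro w0 counts dups hcnt hdups
    simpa using ⟨hcnt, hdups⟩
  | cons c w ih =>
    intro w0 counts dups hcnt hdups
    rw [List.append_cons]
    simp only [List.foldl_cons, fmpInitStep]
    apply ih
    · intro c'
      rw [PySem.Dict.getD_insert]
      by_cases h : c' = c
      · subst h
        rw [if_pos rfl, hcnt c']
        push_cast [List.count_append, List.count_cons, beq_iff_eq]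
        simp
      · rw [if_neg h, hcnt c']
        push_cast [List.count_append, List.count_cons]
        simp [beq_iff_eq, Ne.symm h]
    · rw [hcnt c, hdups, dupCount_append]
      by_cases h : w0.count c = 1
      · rw [if_pos h, if_pos (by rw [h]; norm_num)]
      · rw [if_neg h, if_neg (by simp [beq_iff_eq]; omega)]
        ring

theorem loopB_eq (s : List Char) (L : Nat) (size : Int) :
    ∀ (m k : Nat) (counts : PySem.Dict Char Int) (dups : Int),
    L ≤ s.length → k + m + L = s.length →
    (∀ c, counts.getD c 0 = (((s.drop k).take L).count c : Int)) →
    dups = dupCount ((s.drop k).take L) →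
    fmpLoopB s L size m k counts dups
      = fmpLoopA (s.drop (L + k)) ((s.drop k).take L) (size + (k : Int)) := by
  intro m
  induction m with
  | zero =>
    intro k counts dups hL hkm hcnt hdups
    rw [List.drop_eq_nil_of_le (by omega)]
    rfl
  | succ m ih =>
    intro k counts dups hL hkm hcnt hdups
    have hkL : L + k < s.length := by omega
    rw [List.drop_eq_getElem_cons hkL]
    simp only [fmpLoopB, fmpLoopA]
    by_cases hnd : ((s.drop k).take L).Nodup
    · have ha : are_duplicates ((s.drop k).take L) = false := (are_duplicates_false_iff _).mpr hnd
      have hd0 : dups = 0 := hdups.trans ((dupCount_eq_zero_iff _).mpr hnd)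
      rw [ha, hd0]
      simp
    · have ha : are_duplicates ((s.drop k).take L) = true := by
        cases hb : are_duplicates ((s.drop k).take L)
        · exact absurd ((are_duplicates_false_iff _).mp hb) hnd
        · rfl
      have hd0 : ¬ dups = 0 := fun hc => hnd ((dupCount_eq_zero_iff _).mp (hdups ▸ hc))
      have hw : (s.drop k).take L ≠ [] := fun hnil => by rw [hnil] at hnd; exact hnd List.nodup_nil
      have hkn : k < s.length := by
        by_contra hh
        exact hw (by rw [List.drop_eq_nil_of_le (by omega)]; simp)
      have hL1 : 1 ≤ L := by
        by_contra hh
        exact hw (by rw [Nat.le_zero.mp (by omega : L ≤ 0)]; simp)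
      have hwin : (s.drop k).take L = s[k] :: (s.drop (k + 1)).take (L - 1) := by
        conv_lhs => rw [List.drop_eq_getElem_cons hkn, show L = (L - 1) + 1 from by omega]
        rw [List.take_succ_cons]
      have hnext : (s.drop (k + 1)).take (L - 1) ++ [s[k + L]] = (s.drop (k + 1)).take L := by
        conv_rhs => rw [show L = (L - 1) + 1 by omega]
        rw [List.take_add_one, List.getElem?_drop, show k + 1 + (L - 1) = k + L by omega,
            List.getElem?_eq_getElem (by omega)]
        rfl
      have hg1 : s.getD k ' ' = s[k] := List.getD_eq_getElem s ' ' hkn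
      have hg2 : s.getD (k + L) ' ' = s[k + L] := List.getD_eq_getElem s ' ' (by omega)
      rw [ha, hg1, hg2]
      rw [if_neg (by simpa using hd0)]
      simp only [Bool.not_true, Bool.false_eq_true, if_false]
      -- abbreviations for the window head/tail and the new character
      have hcnt' := fun c => (hwin ▸ hcnt c :
        counts.getD c 0 = ((s[k] :: (s.drop (k + 1)).take (L - 1)).count c : Int))
      have hdups' : dups = dupCount (s[k] :: (s.drop (k + 1)).take (L - 1)) := hwin ▸ hdups
      set c1 := s[k] with hc1
      set c2 := s[k + L] with hc2
      set t := (s.drop (k + 1)).take (L - 1) with htdef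
      -- value of the decremented entry
      have hv1 : counts.getD c1 0 - 1 = (t.count c1 : Int) := by
        rw [hcnt' c1]
        simp
      -- value of the incremented entry
      have hv2 : (counts.insert c1 (counts.getD c1 0 - 1)).getD c2 0 + 1 = (t.count c2 : Int) + 1 := by
        rw [PySem.Dict.getD_insert]
        by_cases h : c2 = c1
        · rw [if_pos h, hv1, h]
        · rw [if_neg h, hcnt' c2]
          simp [Ne.symm h]
      -- the two dict updates realise the counts of the next window
      have hcnt2 : ∀ c, (((counts.insert c1 (counts.getD c1 0 - 1)).insert c2
            ((counts.insert c1 (counts.getD c1 0 - 1)).getD c2 0 + 1)).getD c 0)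
          = (((s.drop (k + 1)).take L).count c : Int) := by
        intro c
        rw [← hnext, PySem.Dict.getD_insert]
        by_cases h2 : c = c2
        · rw [if_pos h2, hv2, h2]
          push_cast [List.count_append, List.count_cons]
          simp
        · rw [if_neg h2, PySem.Dict.getD_insert]
          have hca : ((t ++ [c2]).count c : Int) = (t.count c : Int) := by
            push_cast [List.count_append, List.count_cons]
            simp [Ne.symm h2]
          rw [hca]
          by_cases h1 : c = c1
          · rw [if_pos h1, hv1, h1]
          · rw [if_neg h1, hcnt' c]
            simp [Ne.symm h1]
      -- the duplicate counter tracks dupCount of the next window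
      have hdups2 : (if ((counts.insert c1 (counts.getD c1 0 - 1)).getD c2 0 + 1) == 2
            then (if (counts.getD c1 0 - 1) == 1 then dups - 1 else dups) + 1
            else (if (counts.getD c1 0 - 1) == 1 then dups - 1 else dups))
          = dupCount ((s.drop (k + 1)).take L) := by
        have hstep1 : (if (counts.getD c1 0 - 1) == 1 then dups - 1 else dups) = dupCount t := by
          rw [hv1, hdups', dupCount_cons]
          by_cases h : t.count c1 = 1
          · rw [if_pos (by simp [h]), if_pos h]
            ring
          · rw [if_neg (by simpa using fun hh : (t.count c1 : Int) = 1 => h (by omega)), if_neg h]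
            ring
        rw [← hnext, hv2, hstep1, dupCount_append]
        by_cases h : t.count c2 = 1
        · rw [if_pos (by simp [h]), if_pos h]
        · rw [if_neg (by simpa using fun hh : (t.count c2 : Int) + 1 = 2 => h (by omega)), if_neg h]
          ring
      rw [hdups2]
      have hrec := ih (k + 1) _ _ hL (by omega) hcnt2 (rfl)
      rw [hwin, List.tail_cons]
      simp only [Nat.add_comm L k]
      rw [show k + L + 1 = L + (k + 1) from by omega]
      rw [show size + (k : Int) + 1 = size + ((k + 1 : Nat) : Int) from by push_cast; ring]
      rw [hnext]
      exact hrec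

theorem slice_take (s : List Char) (size : Int) :
    PySem.List.slice s none (some size)
      = s.take (PySem.List.slice s none (some size)).length ∧
    PySem.List.slice s (some size) none
      = s.drop (PySem.List.slice s none (some size)).length := by
  by_cases hpos : (0:Int) ≤ size
  · obtain ⟨a, rfl⟩ : ∃ a : Nat, size = (a : Int) := ⟨size.toNat, (Int.toNat_of_nonneg hpos).symm⟩
    rw [PySem.List.slice_to_natCast, PySem.List.slice_from_natCast, List.length_take]
    rcases Nat.le_total a s.length with hh | hh
    · rw [Nat.min_eq_left hh]
      exact ⟨rfl, rfl⟩
    · rw [Nat.min_eq_right hh, List.take_length, List.take_of_length_le hh,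
          List.drop_of_length_le hh, List.drop_length]
      exact ⟨rfl, rfl⟩
  · obtain ⟨k, hk, rfl⟩ : ∃ k : Nat, 0 < k ∧ size = -(k : Int) := by
      refine ⟨(-size).toNat, by omega, ?_⟩
      have := Int.toNat_of_nonneg (by omega : (0 : Int) ≤ -size)
      omega
    rw [PySem.List.slice_to_neg_natCast _ _ hk, PySem.List.slice_from_neg_natCast _ _ hk,
        List.length_take, Nat.min_eq_left (Nat.sub_le _ _)]
    exact ⟨rfl, rfl⟩

theorem ports_agree (text : String) (size : Int) :
    find_marker_position text size = find_marker_position_alt text size := by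
  unfold find_marker_position find_marker_position_alt
  simp only [PySem.Str.toList_slice, PySem.Chars.slice_eq_listSlice]
  obtain ⟨h1, h2⟩ := slice_take text.toList size
  set s := text.toList with hs
  set L := (PySem.List.slice s none (some size)).length with hLdef
  have hLle : L ≤ s.length := by
    have := congrArg List.length h1
    rw [List.length_take] at this
    omega
  rw [h1, h2]
  have hinit := init_inv (s.take L) [] PySem.Dict.empty 0
      (by intro c; simp [PySem.Dict.getD_empty]) (by simp [dupCount])
  rw [List.nil_append] at hinit
  have hmain := loopB_eq s L size (s.length - L) 0 _ _ hLle (by omega)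
      (by simpa using hinit.1) (by simpa using hinit.2)
  simp only [Nat.add_zero, List.drop_zero, Int.natCast_zero, add_zero] at hmain
  exact hmain.symm

-- ===== VERDICT (by name: the statement is the Claim_ definition above) =====
theorem find_marker_position_spec : Claim_equal_find_marker_position := by
  unfold Claim_equal_find_marker_position
  intro text size _
  unfold Spec_find_marker_position
  exact ports_agree text size
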